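-- pv_equiv track=rewrite | github.com/rahulrajaram/hulista | scripts/write_security_requirements.py | _requirement_name
-- ===== SOURCE A (Python) =====
-- def _normalize_name(name: str) -> str:
--     return name.strip().lower().replace("_", "-").replace(".", "-")
--
-- def _requirement_name(requirement: str) -> str:
--     token = requirement.strip()
--     end = len(token)
--     for marker in ("[", "<", ">", "=", "!", "~", ";", " "):
--         pos = token.find(marker)
--         if pos != -1:
--             end = min(end, pos)
--     return _normalize_name(token[:end])
-- ===== SOURCE B (Python) =====
-- _MARKERS = frozenset("[<>=!~; ")
--
-- def _normalize_name(name: str) -> str: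
--     return name.strip().lower().replace("_", "-").replace(".", "-")
--
-- def _requirement_name(requirement: str) -> str:
--     token = requirement.strip()
--     end = len(token)
--     for i, ch in enumerate(token):
--         if ch in _MARKERS:
--             end = i
--             break
--     return _normalize_name(token[:end])
-- ===== Notes on version B (the rewrite author's own statement) =====
-- stated objective: simpler
-- what changed: replaces eight full str.find scans combined with min by a single left-to-right scan that stops at the first marker character (looked up in a frozenset)
import Mathlib
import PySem

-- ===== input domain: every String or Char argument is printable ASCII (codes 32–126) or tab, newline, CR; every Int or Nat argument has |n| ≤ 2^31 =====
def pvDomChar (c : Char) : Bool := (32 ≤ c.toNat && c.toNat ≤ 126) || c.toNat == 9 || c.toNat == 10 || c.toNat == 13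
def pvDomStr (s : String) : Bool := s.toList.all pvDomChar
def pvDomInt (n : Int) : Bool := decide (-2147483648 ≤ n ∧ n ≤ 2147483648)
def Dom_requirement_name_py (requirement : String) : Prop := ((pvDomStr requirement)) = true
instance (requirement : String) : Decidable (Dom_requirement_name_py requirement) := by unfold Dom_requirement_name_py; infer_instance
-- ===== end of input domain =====

-- B replaces A's eight full str.find scans combined by min with one left-to-right scan that
-- stops at the first marker character; objective: simpler (single pass), same return value.

-- ===== PORT A =====
-- shared helper: Python _normalize_name (identical in A and B)
def pvNormalize (name : String) : String :=
  PySem.Str.replace (PySem.Str.replace (PySem.Str.lower (PySem.Str.strip name)) "_" "-") "." "-"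

def requirement_name_py (requirement : String) : String :=
  let token := PySem.Str.strip requirement
  let e : Int :=
    (["[", "<", ">", "=", "!", "~", ";", " "] : List String).foldl
      (fun e m =>
        let pos := PySem.Str.find token m
        if pos ≠ -1 then min e pos else e)
      (PySem.Str.len token)
  pvNormalize (PySem.Str.slice token none (some e))

-- ===== PORT B =====
def pvMarkerSet : PySem.Set Char := PySem.Set.ofList ['[', '<', '>', '=', '!', '~', ';', ' ']

-- the 'for i, ch in enumerate(token): if ch in _MARKERS: end = i; break' loop
def pvScan (cs : List Char) (i : Nat) (endv : Nat) : Nat :=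
  match cs with
  | [] => endv
  | c :: rest => if PySem.Set.contains pvMarkerSet c then i else pvScan rest (i + 1) endv

def requirement_name_py_alt (requirement : String) : String :=
  let token := PySem.Str.strip requirement
  let e : Nat := pvScan token.toList 0 token.toList.length
  pvNormalize (PySem.Str.slice token none (some (e : Int)))

-- ===== PRECONDITION & SPEC =====
def Spec_requirement_name_py (requirement : String) (out : String) : Prop := out = requirement_name_py_alt requirement
instance (requirement : String) (out : String) : Decidable (Spec_requirement_name_py requirement out) := by unfold Spec_requirement_name_py; infer_instance

-- ===== CLAIM (what is proved, stated in full; the proofs are below) =====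
def Claim_equal_requirement_name_py : Prop := ∀ (requirement : String), Dom_requirement_name_py requirement → Spec_requirement_name_py requirement (requirement_name_py requirement)

-- ===== LEMMAS AND PROOFS =====

def pvMarkerChars : List Char := ['[', '<', '>', '=', '!', '~', ';', ' ']

theorem pvMarkerSet_eq : pvMarkerSet = pvMarkerChars := by decide

theorem pv_singleton_prefix (m : Char) (t : List Char) : [m] <+: t ↔ t[0]? = some m := by
  cases t with
  | nil => simp
  | cons a u => simp [List.cons_prefix_cons, eq_comm]

theorem pv_singleton_prefix_drop (m : Char) (l : List Char) (i : Nat) :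
    [m] <+: l.drop i ↔ l[i]? = some m := by
  rw [pv_singleton_prefix]
  simp

theorem pv_singleton_infix (m : Char) (l : List Char) : [m] <:+: l ↔ m ∈ l := by
  constructor
  · intro h; exact h.mem (by simp)
  · intro h
    obtain ⟨s, t, rfl⟩ := List.append_of_mem h
    exact ⟨s, t, by simp⟩

-- position of the first m in l, when m ∈ l, as a takeWhile length
theorem pv_takeWhile_stop (l : List Char) (m : Char) (hm : m ∈ l) :
    l[(l.takeWhile (fun c => !(c == m))).length]? = some m ∧
      ∀ i < (l.takeWhile (fun c => !(c == m))).length, l[i]? ≠ some m := by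
  induction l with
  | nil => simp at hm
  | cons c rest ih =>
    by_cases hc : c = m
    · subst hc; simp
    · have hm' : m ∈ rest := by
        rcases List.mem_cons.mp hm with h | h
        · exact absurd h.symm hc
        · exact h
      obtain ⟨h1, h2⟩ := ih hm'
      refine ⟨by simpa [List.takeWhile_cons, hc] using h1, ?_⟩
      intro i hi
      rw [List.takeWhile_cons] at hi
      simp only [show (!(c == m)) = true by simp [hc], if_true, List.length_cons] at hi
      cases i with
      | zero => simp [hc]
      | succ j =>
        simp only [List.getElem?_cons_succ]
        exact h2 j (by omega)

-- when m does not occur, the m-free prefix is all of l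
theorem pv_takeWhile_all (l : List Char) (m : Char) (hm : m ∉ l) :
    l.takeWhile (fun c => !(c == m)) = l := by
  induction l with
  | nil => rfl
  | cons c r ih =>
    simp only [List.mem_cons, not_or] at hm
    have hc : (c == m) = false := beq_eq_false_iff_ne.mpr (fun h => hm.1 h.symm)
    simp [hc, ih hm.2]

-- find of a one-char substring is the length of the maximal m-free prefix, or -1
theorem pv_find_singleton (l : List Char) (m : Char) :
    PySem.Chars.find l [m] =
      if m ∈ l then ((l.takeWhile (fun c => !(c == m))).length : Int) else -1 := by
  by_cases hm : m ∈ l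
  · have hinf : [m] <:+: l := (pv_singleton_infix m l).mpr hm
    have h0 : 0 ≤ PySem.Chars.find l [m] := (PySem.Chars.find_nonneg_iff l [m]).mpr hinf
    obtain ⟨hpre, hmin⟩ := PySem.Chars.find_spec h0
    set k := (PySem.Chars.find l [m]).toNat with hk
    set τ := (l.takeWhile (fun c => !(c == m))).length with hτ
    obtain ⟨hτget, hτmin⟩ := pv_takeWhile_stop l m hm
    have hkτ : k = τ := by
      have h1 : k ≤ τ := by
        by_contra hlt
        exact hmin τ (by omega) ((pv_singleton_prefix_drop m l τ).mpr hτget)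
      have h2 : τ ≤ k := by
        by_contra hlt
        exact hτmin k (by omega) ((pv_singleton_prefix_drop m l k).mp hpre)
      omega
    have heq : PySem.Chars.find l [m] = (k : Int) := by omega
    rw [heq, hkτ, if_pos hm]
  · have heq : PySem.Chars.find l [m] = -1 :=
      (PySem.Chars.find_eq_neg_one_iff l [m]).mpr (fun h => hm ((pv_singleton_infix m l).mp h))
    rw [heq, if_neg hm]

-- takeWhile of a conjunction
theorem pv_takeWhile_and (l : List Char) (p q : Char → Bool) :
    (l.takeWhile (fun c => p c && q c)).length
      = min (l.takeWhile p).length (l.takeWhile q).length := by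
  induction l with
  | nil => simp
  | cons c rest ih =>
    by_cases hp : p c <;> by_cases hq : q c <;> simp [hp, hq, ih]

theorem pv_contains_cons_pred (m : Char) (rest : List Char) :
    (fun c => !((m :: rest).contains c)) = (fun c => !(c == m) && !(rest.contains c)) := by
  funext c; by_cases h : c = m <;> simp [h]

-- A's foldl over any list of single-char markers computes min e (marker-free prefix length)
theorem pv_foldl_min (l : List Char) (ms : List Char) (e : Int) (he : e ≤ (l.length : Int)) :
    ms.foldl
      (fun e m =>
        if PySem.Chars.find l [m] ≠ -1 then min e (PySem.Chars.find l [m]) else e) e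
      = min e ((l.takeWhile (fun c => !(ms.contains c))).length : Int) := by
  induction ms generalizing e with
  | nil =>
    have htrue : (l.takeWhile (fun _ => true)) = l := by
      induction l with
      | nil => rfl
      | cons c rest _ => simp
    simpa [htrue] using (min_eq_left he).symm
  | cons m rest ih =>
    simp only [List.foldl_cons]
    have hτle : ∀ p : Char → Bool, (l.takeWhile p).length ≤ l.length :=
      fun p => (List.takeWhile_prefix p).length_le
    have hand : (l.takeWhile (fun c => !((m :: rest).contains c))).length
        = min (l.takeWhile (fun c => !(c == m))).length
              (l.takeWhile (fun c => !(rest.contains c))).length := by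
      rw [pv_contains_cons_pred, pv_takeWhile_and]
    by_cases hm : m ∈ l
    · have hfind := pv_find_singleton l m
      rw [if_pos hm] at hfind
      have hcond : ((l.takeWhile (fun c => !(c == m))).length : Int) ≠ -1 := by omega
      rw [hfind, if_pos hcond, ih _ (le_trans (min_le_left _ _) he), hand]
      have h1 := hτle (fun c => !(c == m))
      have h2 := hτle (fun c => !(rest.contains c))
      omega
    · have hfind := pv_find_singleton l m
      rw [if_neg hm] at hfind
      rw [hfind, if_neg (by simp), ih _ he, hand, pv_takeWhile_all l m hm]
      have h2 := hτle (fun c => !(rest.contains c))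
      omega

-- B's scan computes the marker-free prefix length
theorem pv_scan_eq (l : List Char) (i d : Nat) :
    pvScan l i d =
      if (l.takeWhile (fun c => !(pvMarkerChars.contains c))).length = l.length then d
      else i + (l.takeWhile (fun c => !(pvMarkerChars.contains c))).length := by
  induction l generalizing i with
  | nil => simp [pvScan]
  | cons c rest ih =>
    have hsc : PySem.Set.contains pvMarkerSet c = pvMarkerChars.contains c := by
      rw [pvMarkerSet_eq]; rfl
    by_cases hc : pvMarkerChars.contains c = true
    · rw [show pvScan (c :: rest) i d = i from by rw [pvScan, hsc, if_pos hc]]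
      rw [List.takeWhile_cons]
      simp only [hc, Bool.not_true]
      simp
    · have hcb : pvMarkerChars.contains c = false := by simpa using hc
      rw [show pvScan (c :: rest) i d = pvScan rest (i + 1) d from by
        rw [pvScan, hsc, if_neg hc]]
      rw [ih, List.takeWhile_cons]
      simp only [hcb, Bool.not_false, if_true, List.length_cons]
      split_ifs <;> omega

-- ===== VERDICT (by name: the statement is the Claim_ definition above) =====
theorem requirement_name_py_spec : Claim_equal_requirement_name_py := by
  intro requirement _
  unfold Spec_requirement_name_py
  simp only [requirement_name_py, requirement_name_py_alt]
  generalize PySem.Str.strip requirement = token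
  have htwle : (token.toList.takeWhile (fun c => !(pvMarkerChars.contains c))).length
      ≤ token.toList.length := (List.takeWhile_prefix _).length_le
  have hB : pvScan token.toList 0 token.toList.length
      = (token.toList.takeWhile (fun c => !(pvMarkerChars.contains c))).length := by
    rw [pv_scan_eq]; split_ifs with h <;> omega
  have hms : (["[", "<", ">", "=", "!", "~", ";", " "] : List String)
      = pvMarkerChars.map (fun c => String.singleton c) := by decide
  rw [hms, List.foldl_map, hB]
  have hfn : (fun (e : Int) (c : Char) =>
        if PySem.Str.find token (String.singleton c) ≠ -1 then
          min e (PySem.Str.find token (String.singleton c)) else e)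
      = (fun (e : Int) (m : Char) =>
        if PySem.Chars.find token.toList [m] ≠ -1 then
          min e (PySem.Chars.find token.toList [m]) else e) := by
    funext e c
    have hsing : (String.singleton c).toList = [c] := by simp
    rw [PySem.Str.find_eq, hsing]
  have hlen : PySem.Str.len token = (token.toList.length : Int) := by simp
  rw [hfn, hlen, pv_foldl_min token.toList pvMarkerChars _ (le_refl _)]
  have hmin : min ((token.toList.length : Nat) : Int)
      (((token.toList.takeWhile (fun c => !(pvMarkerChars.contains c))).length : Nat) : Int)
      = (((token.toList.takeWhile (fun c => !(pvMarkerChars.contains c))).length : Nat) : Int) := by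
    omega
  rw [hmin]
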